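-- pv_equiv track=rewrite | github.com/easantanders21/holbertonschool-machine_learning | math/calculus/9-sum_total.py | summation_i_squared
-- ===== SOURCE A (Python) =====
-- def summation_i_squared(n):
--     ''' function that calculates the sumaton of n '''
--     if n is None or n <= 0:
--         return None
--     else:
--         sum = 0
--         for i in range(n + 1):
--             sum += i ** 2
--         return sum
-- ===== SOURCE B (Python) =====
-- def summation_i_squared(n):
--     ''' closed form: triangular number times (2n+1), then exact division by 3 '''
--     if n is not None and n > 0:
--         t = n * (n + 1) // 2
--         return t * (2 * n + 1) // 3
--     return None
-- ===== Notes on version B (the rewrite author's own statement) =====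
-- stated objective: faster
-- what changed: Replaced the linear loop summing squares with a two-step closed form: the triangular number n(n+1)//2 multiplied by (2n+1) and divided exactly by 3.
import Mathlib
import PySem

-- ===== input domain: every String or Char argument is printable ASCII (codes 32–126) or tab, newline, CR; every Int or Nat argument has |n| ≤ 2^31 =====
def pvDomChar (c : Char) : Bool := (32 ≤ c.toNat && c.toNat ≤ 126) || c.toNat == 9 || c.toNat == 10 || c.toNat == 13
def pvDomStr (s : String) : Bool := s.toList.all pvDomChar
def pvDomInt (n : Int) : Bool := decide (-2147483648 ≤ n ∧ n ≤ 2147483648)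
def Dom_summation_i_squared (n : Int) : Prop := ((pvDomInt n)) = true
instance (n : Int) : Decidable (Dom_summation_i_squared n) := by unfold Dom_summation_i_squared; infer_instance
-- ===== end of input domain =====

-- B replaces the linear summation loop with a two-step closed form (triangular number, then exact division by 3); objective: faster.

-- ===== PORT A =====
def summation_i_squared (n : Int) : Option Int :=
  if n ≤ 0 then none
  else some ((PySem.List.pyRange 0 (n + 1) 1).foldl (fun s i => s + i ^ 2) 0)

-- ===== PORT B =====
def pvTriangularTimesOdd (n : Int) : Int :=
  let t := PySem.Int.floordiv (n * (n + 1)) 2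
  PySem.Int.floordiv (t * (2 * n + 1)) 3

def summation_i_squared_alt (n : Int) : Option Int :=
  if 0 < n then some (pvTriangularTimesOdd n) else none

-- ===== PRECONDITION & SPEC =====
def Spec_summation_i_squared (n : Int) (out : Option Int) : Prop := out = summation_i_squared_alt n
instance (n : Int) (out : Option Int) : Decidable (Spec_summation_i_squared n out) := by unfold Spec_summation_i_squared; infer_instance

-- ===== CLAIM (what is proved, stated in full; the proofs are below) =====
def Claim_equal_summation_i_squared : Prop := ∀ (n : Int), Dom_summation_i_squared n → Spec_summation_i_squared n (summation_i_squared n)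

-- ===== LEMMAS AND PROOFS =====

theorem pv_foldl_add_const (l : List Int) (f : Int → Int) :
    ∀ a : Int, l.foldl (fun s i => s + f i) a = a + l.foldl (fun s i => s + f i) 0 := by
  induction l with
  | nil => intro a; simp
  | cons x xs ih =>
      intro a
      simp only [List.foldl_cons]
      rw [ih (a + f x), ih (0 + f x)]
      ring

theorem pv_sumsq (n : Int) (hn : 0 ≤ n) :
    ((PySem.List.pyRange 0 (n + 1) 1).foldl (fun s i => s + i ^ 2) 0) * 6
      = n * (n + 1) * (2 * n + 1) := by
  induction n, hn using Int.le_induction with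
  | base => decide
  | succ m hm ih =>
      rw [PySem.List.pyRange_one_succ_right (by omega : (0:Int) ≤ m + 1)]
      rw [List.foldl_append]
      simp only [List.foldl_cons, List.foldl_nil]
      rw [pv_foldl_add_const _ (fun i => i ^ 2)]
      nlinarith [ih]

-- ===== VERDICT (by name: the statement is the Claim_ definition above) =====
theorem summation_i_squared_spec : Claim_equal_summation_i_squared := by
  intro n _
  unfold Spec_summation_i_squared summation_i_squared summation_i_squared_alt pvTriangularTimesOdd
  by_cases h : n ≤ 0
  · simp [h, show ¬ (0 < n) from by omega]
  · simp only [h, if_false, show (0 < n) from by omega, if_true]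
    have hn : 0 ≤ n := by omega
    have hs := pv_sumsq n hn
    set S := (PySem.List.pyRange 0 (n + 1) 1).foldl (fun s i => s + i ^ 2) 0 with hS
    congr 1
    obtain ⟨k, hk⟩ := Int.even_mul_succ_self n
    rw [PySem.Int.floordiv_eq_ediv_of_pos (by norm_num : (0:Int) < 2),
        PySem.Int.floordiv_eq_ediv_of_pos (by norm_num : (0:Int) < 3)]
    have ht : n * (n + 1) / 2 = k := by omega
    rw [ht]
    have h3 : k * (2 * n + 1) = 3 * S := by nlinarith [hs, hk]
    omega
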